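-- pv_equiv track=rewrite | github.com/LugolBis/Meta-Simulation | src/translate.py | generate_color
-- ===== SOURCE A (Python) =====
-- def generate_color(n:int) -> tuple[int,int,int]:
--     '''
--         Expects an 8-bit n.
--     '''
--
--     transpositions = [
--         [0, 1, 2, 3, 4, 5, 6, 7],
--         [7, 6, 5, 4, 3, 2, 1, 0],
--         [4, 3, 2, 1, 0, 7, 6, 5]
--     ]
--
--     # Apply transpositions
--     result = []
--     for trans in transpositions:
--         composante = 0
--         old_index = 0
--         for new_index in trans:
--             composante = composante | (nth_bit(n, old_index) << new_index)
--             old_index += 1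
--         result.append(composante)
--
--     return tuple(result)
--
-- def nth_bit(x: int, n: int) -> int:
--     return (x >> n)%2
-- ===== SOURCE B (Python) =====
-- def generate_color(n):
--     # First channel: identity permutation of the low byte.
--     b = n & 0xFF
--     # Second channel: the low byte with its bits reversed
--     # (swap nibbles, then bit pairs, then adjacent bits).
--     r = ((b & 0x0F) << 4) | (b >> 4)
--     r = ((r & 0x33) << 2) | ((r >> 2) & 0x33)
--     r = ((r & 0x55) << 1) | ((r >> 1) & 0x55)
--     # Third channel: the fixed rearrangement obtained from the reversal by
--     # moving its low five bits down and its high three bits up.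
--     return (b, r, (r >> 3) | ((r & 0x07) << 5))
-- ===== Notes on version B (the rewrite author's own statement) =====
-- stated objective: idiomatic
-- what changed: Replaced the transposition tables, the nested per-bit loops and the nth_bit helper by closed-form bitwise mask-and-shift expressions for the three channels (identity low byte, byte reversal, and a fixed rearrangement of that reversal).
import Mathlib
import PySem

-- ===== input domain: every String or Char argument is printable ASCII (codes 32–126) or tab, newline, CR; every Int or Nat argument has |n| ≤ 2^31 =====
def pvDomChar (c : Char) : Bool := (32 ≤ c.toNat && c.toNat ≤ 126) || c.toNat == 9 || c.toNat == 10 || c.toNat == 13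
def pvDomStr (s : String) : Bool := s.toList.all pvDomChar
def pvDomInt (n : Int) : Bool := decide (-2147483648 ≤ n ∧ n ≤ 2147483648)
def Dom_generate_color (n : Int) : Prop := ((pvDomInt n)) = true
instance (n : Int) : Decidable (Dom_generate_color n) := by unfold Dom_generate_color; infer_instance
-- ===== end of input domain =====

-- B replaces A's transposition tables and nested per-bit loops by closed-form bitwise
-- channel expressions (idiomatic; same behaviour on every Int input, A is total).

-- ===== PORT A =====
-- nth_bit(x, n) = (x >> n) % 2; A only calls it with n in 0..7 (old_index), so .toNat is exact here.
def nth_bit (x : Int) (n : Int) : Int := PySem.Int.mod (x >>> n.toNat) 2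

def generate_color (n : Int) : Int × Int × Int :=
  let transpositions : List (List Int) :=
    [[0, 1, 2, 3, 4, 5, 6, 7],
     [7, 6, 5, 4, 3, 2, 1, 0],
     [4, 3, 2, 1, 0, 7, 6, 5]]
  -- Apply transpositions
  let result : List Int := transpositions.foldl (fun result trans =>
    let st := trans.foldl (fun (st : Int × Int) new_index =>
        (PySem.Int.bor st.1 (nth_bit n st.2 <<< new_index.toNat), st.2 + 1))
      ((0 : Int), (0 : Int))
    result ++ [st.1]) []
  -- tuple(result): result always has exactly 3 elements
  (result.getD 0 0, result.getD 1 0, result.getD 2 0)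

-- ===== PORT B =====
def generate_color_alt (n : Int) : Int × Int × Int :=
  let b := PySem.Int.band n 0xFF
  let r1 := PySem.Int.bor ((PySem.Int.band b 0x0F) <<< 4) (b >>> 4)
  let r2 := PySem.Int.bor ((PySem.Int.band r1 0x33) <<< 2) (PySem.Int.band (r1 >>> 2) 0x33)
  let r3 := PySem.Int.bor ((PySem.Int.band r2 0x55) <<< 1) (PySem.Int.band (r2 >>> 1) 0x55)
  (b, r3, PySem.Int.bor (r3 >>> 3) ((PySem.Int.band r3 0x07) <<< 5))

-- ===== PRECONDITION & SPEC =====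
def Spec_generate_color (n : Int) (out : Int × Int × Int) : Prop := out = generate_color_alt n
instance (n : Int) (out : Int × Int × Int) : Decidable (Spec_generate_color n out) := by unfold Spec_generate_color; infer_instance

-- ===== CLAIM (what is proved, stated in full; the proofs are below) =====
def Claim_equal_generate_color : Prop := ∀ (n : Int), Dom_generate_color n → Spec_generate_color n (generate_color n)

-- ===== LEMMAS AND PROOFS =====

-- Python n & 255 is the low byte: band with 255 is emod 256 for every Int.
theorem band255_eq_emod (n : Int) : PySem.Int.band n 255 = n % 256 := by
  unfold PySem.Int.band
  rw [show (255 : Int).toNat = 255 from rfl]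
  have h1 : n.toNat &&& 255 = n.toNat % 256 := by
    simpa using Nat.and_two_pow_sub_one_eq_mod n.toNat 8
  have h2 : 255 &&& (-n - 1).toNat = (-n - 1).toNat % 256 := by
    rw [Nat.land_comm]; simpa using Nat.and_two_pow_sub_one_eq_mod (-n - 1).toNat 8
  split_ifs <;> omega

-- nth_bit only reads bits 0..7, so it factors through n % 256.
theorem nth_bit_mod (n k : Int) (h0 : 0 ≤ k) (h8 : k < 8) :
    nth_bit n k = nth_bit (n % 256) k := by
  unfold nth_bit
  rw [Int.shiftRight_eq_div_pow, Int.shiftRight_eq_div_pow,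
      PySem.Int.mod_eq_emod_of_pos (show (0:Int) < 2 by norm_num),
      PySem.Int.mod_eq_emod_of_pos (show (0:Int) < 2 by norm_num)]
  obtain ⟨j, rfl⟩ : ∃ j : Nat, k = (j : Int) := ⟨k.toNat, (Int.toNat_of_nonneg h0).symm⟩
  simp only [Int.toNat_natCast]
  push_cast
  have hj : j < 8 := by exact_mod_cast h8
  have key : (n % 256) / 2 ^ j = n / 2 ^ j + -(2 ^ (8 - j) * (n / 256)) := by
    rw [Int.emod_def, show (256 : Int) = 2 ^ j * 2 ^ (8 - j) by
          rw [← pow_add, show j + (8 - j) = 8 from by omega]; norm_num,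
        show n - 2 ^ j * 2 ^ (8 - j) * (n / (2 ^ j * 2 ^ (8 - j)))
           = n + -(2 ^ (8 - j) * (n / (2 ^ j * 2 ^ (8 - j)))) * 2 ^ j by ring,
        Int.add_mul_ediv_right _ _ (show (2:Int) ^ j ≠ 0 by positivity)]
  have hb : (2 : Int) ∣ 2 ^ (8 - j) * (n / 256) :=
    Dvd.dvd.mul_right (dvd_pow_self (2 : Int) (show 8 - j ≠ 0 by omega)) _
  rw [key]
  omega

theorem genA_mod (n : Int) : generate_color n = generate_color (n % 256) := by
  have hm : ∀ k : Int, 0 ≤ k → k < 8 → nth_bit n k = nth_bit (n % 256) k := nth_bit_mod n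
  simp only [generate_color, List.foldl]
  norm_num [hm]

theorem genB_mod (n : Int) : generate_color_alt n = generate_color_alt (n % 256) := by
  unfold generate_color_alt
  rw [band255_eq_emod, band255_eq_emod, Int.emod_emod_of_dvd n (dvd_refl 256)]

set_option maxRecDepth 10000 in
theorem gen_eq_small : ∀ m : Fin 256, generate_color (m : Int) = generate_color_alt (m : Int) := by
  decide

-- ===== VERDICT (by name: the statement is the Claim_ definition above) =====
theorem generate_color_spec : Claim_equal_generate_color := by
  intro n _
  unfold Spec_generate_color
  rw [genA_mod, genB_mod]
  have h0 : 0 ≤ n % 256 := Int.emod_nonneg n (by norm_num)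
  have h1 : n % 256 < 256 := Int.emod_lt_of_pos n (by norm_num)
  have h := gen_eq_small ⟨(n % 256).toNat, by omega⟩
  simpa [Int.toNat_of_nonneg h0, max_eq_left h0] using h
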